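-- pv_equiv track=rewrite | github.com/dropbox/changes | changes/lib/coverage.py | get_coverage_stats
-- ===== SOURCE A (Python) =====
-- from collections import namedtuple
--
-- CoverageStats = namedtuple(
--     'CoverageStats',
--     ['lines_covered', 'lines_uncovered', 'diff_lines_covered', 'diff_lines_uncovered'])
--
-- def get_coverage_stats(diff_lines, data):
--     """Return a tuple of coverage stats."""
--
--     lines_covered = 0
--     lines_uncovered = 0
--     diff_lines_covered = 0
--     diff_lines_uncovered = 0
--
--     for lineno, code in enumerate(data):
--         # lineno is 1-based in diff
--         line_in_diff = bool((lineno + 1) in diff_lines)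
--         if code == 'C':
--             lines_covered += 1
--             if line_in_diff:
--                 diff_lines_covered += 1
--         elif code == 'U':
--             lines_uncovered += 1
--             if line_in_diff:
--                 diff_lines_uncovered += 1
--
--     return CoverageStats(lines_covered, lines_uncovered, diff_lines_covered, diff_lines_uncovered)
-- ===== SOURCE B (Python) =====
-- from collections import namedtuple
--
-- CoverageStats = namedtuple(
--     'CoverageStats',
--     ['lines_covered', 'lines_uncovered', 'diff_lines_covered', 'diff_lines_uncovered'])
--
-- def get_coverage_stats(diff_lines, data):
--     """Return a tuple of coverage stats."""
--     covered = {lineno + 1 for lineno, code in enumerate(data) if code == 'C'}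
--     uncovered = {lineno + 1 for lineno, code in enumerate(data) if code == 'U'}
--     diff_set = set(diff_lines)
--     return CoverageStats(len(covered), len(uncovered),
--                          len(covered & diff_set), len(uncovered & diff_set))
-- ===== Notes on version B (the rewrite author's own statement) =====
-- stated objective: simpler
-- what changed: Replaces the four-counter loop with per-line branching by two set comprehensions of covered/uncovered line numbers plus set intersection with set(diff_lines); the counts are the set sizes, so the per-line in-diff membership branches disappear.
import Mathlib
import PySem

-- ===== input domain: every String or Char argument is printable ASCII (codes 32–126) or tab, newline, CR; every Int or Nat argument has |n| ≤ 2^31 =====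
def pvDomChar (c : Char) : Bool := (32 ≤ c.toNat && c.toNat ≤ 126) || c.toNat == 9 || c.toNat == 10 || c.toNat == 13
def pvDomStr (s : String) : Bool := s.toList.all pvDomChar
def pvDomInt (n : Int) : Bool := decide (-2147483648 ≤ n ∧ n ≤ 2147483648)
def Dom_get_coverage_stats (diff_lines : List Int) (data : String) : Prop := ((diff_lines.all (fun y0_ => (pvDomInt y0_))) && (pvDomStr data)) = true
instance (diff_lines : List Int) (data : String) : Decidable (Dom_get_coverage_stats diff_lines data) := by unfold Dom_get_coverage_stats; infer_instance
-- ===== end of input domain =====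

-- B replaces the four-counter loop with set comprehensions of covered/uncovered
-- line numbers intersected with set(diff_lines); the counts are the set sizes (simpler).


-- ===== PORT A =====
-- literal transliteration: one pass over enumerate(data), four Int counters,
-- per-line membership test (lineno + 1) in diff_lines
def get_coverage_stats (diff_lines : List Int) (data : String) : List Int :=
  let r := (PySem.List.enumerate data.toList).foldl
    (fun (st : Int × Int × Int × Int) p =>
      let line_in_diff := diff_lines.contains (p.1 + 1)
      if p.2 == 'C' then
        (st.1 + 1, st.2.1, (if line_in_diff then st.2.2.1 + 1 else st.2.2.1), st.2.2.2)
      else if p.2 == 'U' then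
        (st.1, st.2.1 + 1, st.2.2.1, (if line_in_diff then st.2.2.2 + 1 else st.2.2.2))
      else st)
    (0, 0, 0, 0)
  [r.1, r.2.1, r.2.2.1, r.2.2.2]

-- ===== PORT B =====
-- literal transliteration of Source B: two set comprehensions, set(diff_lines), intersections
def get_coverage_stats_alt (diff_lines : List Int) (data : String) : List Int :=
  let covered : PySem.Set Int :=
    PySem.Set.ofList (((PySem.List.enumerate data.toList).filter (fun p => p.2 == 'C')).map (fun p => p.1 + 1))
  let uncovered : PySem.Set Int :=
    PySem.Set.ofList (((PySem.List.enumerate data.toList).filter (fun p => p.2 == 'U')).map (fun p => p.1 + 1))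
  let diff_set : PySem.Set Int := PySem.Set.ofList diff_lines
  [PySem.Set.len covered, PySem.Set.len uncovered,
   PySem.Set.len (PySem.Set.inter covered diff_set),
   PySem.Set.len (PySem.Set.inter uncovered diff_set)]

-- ===== PRECONDITION & SPEC =====
def Spec_get_coverage_stats (diff_lines : List Int) (data : String) (out : List Int) : Prop := out = get_coverage_stats_alt diff_lines data
instance (diff_lines : List Int) (data : String) (out : List Int) : Decidable (Spec_get_coverage_stats diff_lines data out) := by unfold Spec_get_coverage_stats; infer_instance

-- ===== CLAIM (what is proved, stated in full; the proofs are below) =====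
def Claim_equal_get_coverage_stats : Prop := ∀ (diff_lines : List Int) (data : String), Dom_get_coverage_stats diff_lines data → Spec_get_coverage_stats diff_lines data (get_coverage_stats diff_lines data)

-- ===== LEMMAS AND PROOFS =====

-- line numbers produced for a character class, starting at index s
def pvLines (c : Char) (l : List Char) (s : Int) : List Int :=
  ((PySem.List.enumerate l s).filter (fun p => p.2 == c)).map (fun p => p.1 + 1)

theorem pvLines_nil (c : Char) (s : Int) : pvLines c [] s = [] := rfl

theorem pvLines_cons (c x : Char) (l : List Char) (s : Int) :
    pvLines c (x :: l) s =
      (if x == c then [s + 1] else []) ++ pvLines c l (s + 1) := by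
  simp only [pvLines, PySem.List.enumerate_cons, List.filter_cons]
  by_cases h : x == c <;> simp [h]

theorem pvLines_lb (c : Char) (l : List Char) (s : Int) :
    ∀ y ∈ pvLines c l s, s + 1 ≤ y := by
  induction l generalizing s with
  | nil => simp [pvLines_nil]
  | cons x xs ih =>
    intro y hy
    rw [pvLines_cons] at hy
    rcases List.mem_append.mp hy with h1 | h2
    · by_cases hx : x == c <;> simp [hx] at h1 <;> omega
    · have := ih (s + 1) y h2; omega

theorem pvLines_pairwise (c : Char) (l : List Char) (s : Int) :
    (pvLines c l s).Pairwise (· < ·) := by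
  induction l generalizing s with
  | nil => simp [pvLines_nil]
  | cons x xs ih =>
    rw [pvLines_cons]
    by_cases h : x == c
    · simp only [h, if_pos, List.singleton_append, List.pairwise_cons]
      exact ⟨fun y hy => by have := pvLines_lb c xs (s + 1) y hy; omega, ih (s + 1)⟩
    · simpa [h] using ih (s + 1)

-- foldl add over a nodup extension is append
theorem pvOfList_nodup {α : Type} [BEq α] [LawfulBEq α] (xs : List α) (h : xs.Nodup) :
    PySem.Set.ofList xs = xs := by
  suffices H : ∀ (acc ys : List α), (acc ++ ys).Nodup →
      List.foldl PySem.Set.add acc ys = acc ++ ys by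
    simpa using H [] xs (by simpa using h)
  intro acc ys
  induction ys generalizing acc with
  | nil => simp
  | cons y ys ih =>
    intro hnd
    rcases List.nodup_append.mp hnd with ⟨h1, h2, h3⟩
    have hy : y ∉ acc := fun hmem => h3 y hmem y (List.mem_cons_self) rfl
    simp only [List.foldl_cons]
    rw [show PySem.Set.add acc y = acc ++ [y] from by
      simp [PySem.Set.add, List.contains_eq_mem, hy]]
    have := ih (acc ++ [y]) (by simpa using hnd)
    simpa using this

theorem pvLines_ofList (c : Char) (l : List Char) (s : Int) :
    PySem.Set.ofList (pvLines c l s) = pvLines c l s :=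
  pvOfList_nodup _ (pvLines_pairwise c l s).nodup

-- the A-side loop, from an arbitrary accumulator, in terms of pvLines
theorem pvFold_char (diff_lines : List Int) (l : List Char) (s a b cc d : Int) :
    (PySem.List.enumerate l s).foldl
      (fun (st : Int × Int × Int × Int) p =>
        let line_in_diff := diff_lines.contains (p.1 + 1)
        if p.2 == 'C' then
          (st.1 + 1, st.2.1, (if line_in_diff then st.2.2.1 + 1 else st.2.2.1), st.2.2.2)
        else if p.2 == 'U' then
          (st.1, st.2.1 + 1, st.2.2.1, (if line_in_diff then st.2.2.2 + 1 else st.2.2.2))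
        else st)
      (a, b, cc, d)
    = (a + ((pvLines 'C' l s).length : Int),
       b + ((pvLines 'U' l s).length : Int),
       cc + (((pvLines 'C' l s).filter (fun x => diff_lines.contains x)).length : Int),
       d + (((pvLines 'U' l s).filter (fun x => diff_lines.contains x)).length : Int)) := by
  induction l generalizing s a b cc d with
  | nil => simp [pvLines_nil, PySem.List.enumerate_nil]
  | cons x xs ih =>
    rw [PySem.List.enumerate_cons, List.foldl_cons]
    have hCU : ¬ ('C' == 'U') = true := by decide
    by_cases hC : x == 'C'
    · have hxU : ¬ (x == 'U') = true := by
        have := eq_of_beq hC; subst this; exact hCU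
      by_cases hd : (s + 1) ∈ diff_lines
      · rw [if_pos (by simpa using hC), if_pos (by simpa [List.contains_eq_mem] using hd)]
        rw [ih]
        simp [pvLines_cons, hC, hxU, hd, add_comm]
        omega
      · rw [if_pos (by simpa using hC), if_neg (by simpa [List.contains_eq_mem] using hd)]
        rw [ih]
        simp [pvLines_cons, hC, hxU, hd, add_comm]
        omega
    · by_cases hU : x == 'U'
      · by_cases hd : (s + 1) ∈ diff_lines
        · rw [if_neg (by simpa using hC), if_pos (by simpa using hU),
              if_pos (by simpa [List.contains_eq_mem] using hd)]
          rw [ih]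
          simp [pvLines_cons, hC, hU, hd, add_comm]
          omega
        · rw [if_neg (by simpa using hC), if_pos (by simpa using hU),
              if_neg (by simpa [List.contains_eq_mem] using hd)]
          rw [ih]
          simp [pvLines_cons, hC, hU, hd, add_comm]
          omega
      · rw [if_neg (by simpa using hC), if_neg (by simpa using hU)]
        rw [ih]
        simp [pvLines_cons, hC, hU]

-- membership in set(diff_lines) agrees with membership in diff_lines
theorem pvContains_ofList (diff_lines : List Int) (x : Int) :
    (PySem.Set.ofList diff_lines).contains x = diff_lines.contains x := by
  have := PySem.Set.mem_ofList diff_lines x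
  by_cases h : x ∈ diff_lines <;> simp [List.contains_eq_mem, h, this]

-- ===== VERDICT (by name: the statement is the Claim_ definition above) =====
theorem get_coverage_stats_spec : Claim_equal_get_coverage_stats := by
  intro diff_lines data _
  show get_coverage_stats diff_lines data = get_coverage_stats_alt diff_lines data
  unfold get_coverage_stats get_coverage_stats_alt
  rw [pvFold_char diff_lines data.toList 0 0 0 0 0]
  have hC := pvLines_ofList 'C' data.toList 0
  have hU := pvLines_ofList 'U' data.toList 0
  simp only [pvLines] at hC hU
  simp only [PySem.Set.len, PySem.Set.inter, hC, hU, pvLines]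
  have hfc : ∀ (l : List Int),
      l.filter (fun x => (PySem.Set.ofList diff_lines).contains x)
        = l.filter (fun x => diff_lines.contains x) := by
    intro l; apply List.filter_congr; intro x _; exact pvContains_ofList diff_lines x
  rw [hfc, hfc]
  simp
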